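-- pv_equiv track=rewrite | github.com/maxjackson-lab/intercom-gamma-analyzer | src/services/story_driven_preprocessor.py | _extract_journey_moments
-- ===== SOURCE A (Python) =====
-- from typing import Dict, List, Any, Optional, Tuple
--
-- def _extract_journey_moments(
--
--     conversation_stories: List[Dict[str, Any]],
--     canny_stories: List[Dict[str, Any]]
-- ) -> Dict[str, List[Dict[str, Any]]]:
--     """Extract key moments in the customer journey."""
--     journey_moments = {
--         'onboarding': [],
--         'learning': [],
--         'troubleshooting': [],
--         'expansion': [],
--         'churn_risk': [],
--         'ongoing_use': []
--     }
--
--     # Categorize conversation stories by journey stage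
--     for story in conversation_stories:
--         journey_stage = story.get('journey_stage', 'ongoing_use')
--         if journey_stage in journey_moments:
--             journey_moments[journey_stage].append(story)
--
--     return journey_moments
-- ===== SOURCE B (Python) =====
-- STAGES = ('onboarding', 'learning', 'troubleshooting', 'expansion',
--           'churn_risk', 'ongoing_use')
--
--
-- def _extract_journey_moments(conversation_stories, canny_stories):
--     """Extract key moments in the customer journey."""
--     return {
--         stage: [s for s in conversation_stories
--                 if s.get('journey_stage', 'ongoing_use') == stage]
--         for stage in STAGES
--     }
-- ===== Notes on version B (the rewrite author's own statement) =====
-- stated objective: idiomatic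
-- what changed: Replaces the mutable six-bucket dict and single grouping pass (membership test + in-place append per story) with a dict comprehension over the fixed stage tuple that filters the story list once per stage.
import Mathlib
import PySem

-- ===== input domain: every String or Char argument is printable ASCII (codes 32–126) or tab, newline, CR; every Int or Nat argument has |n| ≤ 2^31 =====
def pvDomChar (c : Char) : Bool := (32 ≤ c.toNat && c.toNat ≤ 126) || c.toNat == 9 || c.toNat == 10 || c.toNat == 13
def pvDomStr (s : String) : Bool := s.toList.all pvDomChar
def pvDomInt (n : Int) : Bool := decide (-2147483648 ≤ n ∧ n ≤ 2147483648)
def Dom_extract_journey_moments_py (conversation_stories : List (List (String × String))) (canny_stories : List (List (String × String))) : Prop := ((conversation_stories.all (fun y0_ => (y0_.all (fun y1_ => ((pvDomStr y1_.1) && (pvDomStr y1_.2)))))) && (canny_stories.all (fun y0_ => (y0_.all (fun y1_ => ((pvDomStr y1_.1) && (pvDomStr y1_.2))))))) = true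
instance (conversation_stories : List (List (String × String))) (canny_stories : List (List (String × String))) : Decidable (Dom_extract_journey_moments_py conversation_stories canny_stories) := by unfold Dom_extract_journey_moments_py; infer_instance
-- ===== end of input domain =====

-- B replaces A's single grouping pass over a mutable six-bucket dict with a per-stage
-- filter over the fixed stage list (dict comprehension); same result, more idiomatic.


-- ===== PORT A =====
-- story.get('journey_stage', 'ongoing_use')  (used by both ports, as both Pythons call .get)
def pvStage (story : List (String × String)) : String :=
  (PySem.Dict.mk story).getD "journey_stage" "ongoing_use"

def extract_journey_moments_py (conversation_stories : List (List (String × String))) (canny_stories : List (List (String × String))) : List (String × List (List (String × String))) :=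
  -- journey_moments = {'onboarding': [], …}
  let init : PySem.Dict String (List (List (String × String))) :=
    PySem.Dict.ofList [("onboarding", []), ("learning", []), ("troubleshooting", []),
                       ("expansion", []), ("churn_risk", []), ("ongoing_use", [])]
  -- for story in conversation_stories: if journey_stage in journey_moments: append
  (conversation_stories.foldl
    (fun d story =>
      if d.contains (pvStage story) then d.modify (pvStage story) [] (fun l => l ++ [story]) else d)
    init).items

-- ===== PORT B =====
def pvStages : List String :=
  ["onboarding", "learning", "troubleshooting", "expansion", "churn_risk", "ongoing_use"]

def extract_journey_moments_py_alt (conversation_stories : List (List (String × String))) (canny_stories : List (List (String × String))) : List (String × List (List (String × String))) :=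
  pvStages.map (fun stage => (stage, conversation_stories.filter (fun s => pvStage s == stage)))

-- ===== PRECONDITION & SPEC =====
def Spec_extract_journey_moments_py (conversation_stories : List (List (String × String))) (canny_stories : List (List (String × String))) (out : List (String × List (List (String × String)))) : Prop := out = extract_journey_moments_py_alt conversation_stories canny_stories
instance (conversation_stories : List (List (String × String))) (canny_stories : List (List (String × String))) (out : List (String × List (List (String × String)))) : Decidable (Spec_extract_journey_moments_py conversation_stories canny_stories out) := by unfold Spec_extract_journey_moments_py; infer_instance

-- ===== CLAIM (what is proved, stated in full; the proofs are below) =====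
def Claim_equal_extract_journey_moments_py : Prop := ∀ (conversation_stories : List (List (String × String))) (canny_stories : List (List (String × String))), Dom_extract_journey_moments_py conversation_stories canny_stories → Spec_extract_journey_moments_py conversation_stories canny_stories (extract_journey_moments_py conversation_stories canny_stories)

-- ===== LEMMAS AND PROOFS =====

-- the loop body never adds a key, so the key list is invariant
lemma pv_loop_keys (cs : List (List (String × String)))
    (d : PySem.Dict String (List (List (String × String)))) :
    (cs.foldl
      (fun d story =>
        if d.contains (pvStage story) then d.modify (pvStage story) [] (fun l => l ++ [story]) else d)
      d).keys = d.keys := by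
  induction cs generalizing d with
  | nil => rfl
  | cons s rest ih =>
      simp only [List.foldl_cons]
      by_cases h : d.contains (pvStage s)
      · rw [if_pos h, ih, PySem.Dict.keys_modify,
            PySem.Dict.keys_insert_of_contains _ _ h]
      · rw [if_neg h, ih]

-- value of each bucket after the loop: original value plus the stories filtered to that key
lemma pv_loop_getD (cs : List (List (String × String)))
    (d : PySem.Dict String (List (List (String × String)))) (k : String) :
    (cs.foldl
      (fun d story =>
        if d.contains (pvStage story) then d.modify (pvStage story) [] (fun l => l ++ [story]) else d)
      d).getD k []
    = d.getD k [] ++ (if d.contains k then cs.filter (fun s => pvStage s == k) else []) := by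
  induction cs generalizing d with
  | nil => simp
  | cons s rest ih =>
      simp only [List.foldl_cons]
      by_cases hk : k = pvStage s
      · subst hk
        by_cases h : d.contains (pvStage s)
        · rw [if_pos h, ih, PySem.Dict.getD_modify_self]
          simp [PySem.Dict.contains_modify, h]
        · rw [if_neg h, ih]
          simp [h]
      · by_cases h : d.contains (pvStage s)
        · rw [if_pos h, ih, PySem.Dict.getD_modify, if_neg hk]
          have hc : (d.modify (pvStage s) [] fun l => l ++ [s]).contains k = d.contains k := by
            simp [PySem.Dict.contains_modify, hk]
          rw [hc]
          by_cases hdk : d.contains k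
          · simp [hdk,
              show (pvStage s == k) = false from by simpa using fun e => hk e.symm]
          · simp [hdk]
        · rw [if_neg h, ih]
          by_cases hdk : d.contains k
          · have hne : (pvStage s == k) = false := by
              simpa using fun e => h (by rw [e]; exact hdk)
            simp [hdk, hne]
          · simp [hdk]

-- ===== VERDICT (by name: the statement is the Claim_ definition above) =====
theorem extract_journey_moments_py_spec : Claim_equal_extract_journey_moments_py := by
  intro cs canny _
  show extract_journey_moments_py cs canny = extract_journey_moments_py_alt cs canny
  unfold extract_journey_moments_py extract_journey_moments_py_alt
  set init : PySem.Dict String (List (List (String × String))) :=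
    PySem.Dict.ofList [("onboarding", []), ("learning", []), ("troubleshooting", []),
                       ("expansion", []), ("churn_risk", []), ("ongoing_use", [])] with hinit
  have hkeys := pv_loop_keys cs init
  have hnd : (cs.foldl
      (fun d story =>
        if d.contains (pvStage story) then d.modify (pvStage story) [] (fun l => l ++ [story]) else d)
      init).keys.Nodup := by rw [hkeys]; decide
  rw [PySem.Dict.items_eq_map_keys _ hnd ([] : List (List (String × String)))]
  rw [hkeys]
  have hk : init.keys = pvStages := by decide
  rw [hk]
  apply List.map_congr_left
  intro k hkmem
  have hcont : init.contains k = true := by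
    fin_cases hkmem <;> decide
  have hinitD : init.getD k [] = [] := by
    fin_cases hkmem <;> decide
  rw [pv_loop_getD, hcont, if_pos rfl, hinitD, List.nil_append]
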